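-- pv_equiv track=rewrite | github.com/lostmostcost/SpotiChess | backend/app/services/mapper.py | resolve_synergies
-- ===== SOURCE A (Python) =====
-- GENRE_MAP = {
--     "k-pop": "K-Pop",
--     "korean pop": "K-Pop",
--     "k-rap": "Hip-Hop",
--     "korean r&b": "Hip-Hop",
--     "k-indie": "Indie",
--     "korean indie rock": "Rock",
--     "edm": "EDM",
--     "electronica": "EDM",
--     "trot": "Trot",
-- }
--
-- def resolve_synergies(genres: list[str]) -> list[str]:
--     tags: list[str] = []
--     lowered = [g.lower() for g in genres]
--     for key, tag in GENRE_MAP.items():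
--         if any(key in item for item in lowered) and tag not in tags:
--             tags.append(tag)
--         if len(tags) == 2:
--             break
--     return tags or ["Neutral"]
-- ===== SOURCE B (Python) =====
-- # Inverted index keyed by tag: keys grouped per tag, so no dedup pass is needed.
-- SYNERGY_KEYS = {
--     "K-Pop": ("k-pop", "korean pop"),
--     "Hip-Hop": ("k-rap", "korean r&b"),
--     "Indie": ("k-indie",),
--     "Rock": ("korean indie rock",),
--     "EDM": ("edm", "electronica"),
--     "Trot": ("trot",),
-- }
--
-- def resolve_synergies(genres: list[str]) -> list[str]:
--     lowered = [g.lower() for g in genres]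
--     tags = [tag for tag, keys in SYNERGY_KEYS.items()
--             if any(k in g for k in keys for g in lowered)]
--     return tags[:2] or ["Neutral"]
-- ===== Notes on version B (the rewrite author's own statement) =====
-- stated objective: simpler
-- what changed: Replaces A's scan of the key->tag map with an interleaved append-if-unique accumulator and early break at two by an inverted index grouping keys per tag: one comprehension over the six tag groups collects matched tags (no dedup needed since each tag appears once), then a slice takes the first two.
import Mathlib
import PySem

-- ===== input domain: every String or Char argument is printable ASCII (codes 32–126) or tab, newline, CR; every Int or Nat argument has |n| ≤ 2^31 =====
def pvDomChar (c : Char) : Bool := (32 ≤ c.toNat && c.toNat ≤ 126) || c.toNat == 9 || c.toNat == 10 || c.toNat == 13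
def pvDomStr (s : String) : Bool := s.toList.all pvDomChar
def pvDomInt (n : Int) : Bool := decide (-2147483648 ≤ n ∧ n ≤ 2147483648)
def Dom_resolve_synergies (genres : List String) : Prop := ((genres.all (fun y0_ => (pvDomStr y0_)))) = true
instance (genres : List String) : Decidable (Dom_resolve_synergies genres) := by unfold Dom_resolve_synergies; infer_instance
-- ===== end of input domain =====

-- B inverts the data structure: keys grouped per tag, so no dedup and no early break are needed;
-- same result, simpler shape.

-- ===== PORT A =====
def GENRE_MAP : List (String × String) :=
  [("k-pop", "K-Pop"), ("korean pop", "K-Pop"), ("k-rap", "Hip-Hop"),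
   ("korean r&b", "Hip-Hop"), ("k-indie", "Indie"), ("korean indie rock", "Rock"),
   ("edm", "EDM"), ("electronica", "EDM"), ("trot", "Trot")]

-- the for-loop of A: append tag if key matches and tag not yet present; break at two tags
def loopA (lowered : List String) : List (String × String) → List String → List String
  | [], tags => tags
  | (key, tag) :: rest, tags =>
      let tags' := if lowered.any (fun item => PySem.Str.isIn key item) && !(tags.contains tag)
                   then tags ++ [tag] else tags
      if tags'.length = 2 then tags' else loopA lowered rest tags'

def resolve_synergies (genres : List String) : List String :=
  let tags := loopA (genres.map PySem.Str.lower) GENRE_MAP []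
  if tags = [] then ["Neutral"] else tags

-- ===== PORT B =====
def SYNERGY_KEYS : List (String × List String) :=
  [("K-Pop", ["k-pop", "korean pop"]), ("Hip-Hop", ["k-rap", "korean r&b"]),
   ("Indie", ["k-indie"]), ("Rock", ["korean indie rock"]),
   ("EDM", ["edm", "electronica"]), ("Trot", ["trot"])]

def resolve_synergies_alt (genres : List String) : List String :=
  let lowered := genres.map PySem.Str.lower
  let tags := (SYNERGY_KEYS.filter
      (fun p => p.2.any (fun k => lowered.any (fun g => PySem.Str.isIn k g)))).map (fun p => p.1)
  if tags.take 2 = [] then ["Neutral"] else tags.take 2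

-- ===== PRECONDITION & SPEC =====
def Spec_resolve_synergies (genres : List String) (out : List String) : Prop := out = resolve_synergies_alt genres
instance (genres : List String) (out : List String) : Decidable (Spec_resolve_synergies genres out) := by unfold Spec_resolve_synergies; infer_instance

-- ===== CLAIM (what is proved, stated in full; the proofs are below) =====
def Claim_equal_resolve_synergies : Prop := ∀ (genres : List String), Dom_resolve_synergies genres → Spec_resolve_synergies genres (resolve_synergies genres)

-- ===== LEMMAS AND PROOFS =====

-- A's loop with the per-key match condition abstracted to a precomputed Bool
def loopG : List (Bool × String) → List String → List String
  | [], tags => tags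
  | (b, tag) :: rest, tags =>
      let tags' := if b && !(tags.contains tag) then tags ++ [tag] else tags
      if tags'.length = 2 then tags' else loopG rest tags'

theorem loopA_eq_loopG (lowered : List String) :
    ∀ (pairs : List (String × String)) (tags : List String),
      loopA lowered pairs tags
        = loopG (pairs.map (fun p => (lowered.any (fun item => PySem.Str.isIn p.1 item), p.2))) tags := by
  intro pairs
  induction pairs with
  | nil => intro tags; rfl
  | cons p rest ih =>
      intro tags
      obtain ⟨key, tag⟩ := p
      simp only [loopA, loopG, List.map_cons]
      split <;> simp [ih]

-- ===== VERDICT (by name: the statement is the Claim_ definition above) =====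
theorem resolve_synergies_spec : Claim_equal_resolve_synergies := by
  intro genres _
  show resolve_synergies genres = resolve_synergies_alt genres
  unfold resolve_synergies resolve_synergies_alt
  simp only [loopA_eq_loopG, GENRE_MAP, SYNERGY_KEYS, List.map_cons, List.map_nil,
    List.filter_cons, List.filter_nil, List.any_cons, List.any_nil, Bool.or_false]
  generalize ((genres.map PySem.Str.lower).any fun item => PySem.Str.isIn "k-pop" item) = b1
  generalize ((genres.map PySem.Str.lower).any fun item => PySem.Str.isIn "korean pop" item) = b2
  generalize ((genres.map PySem.Str.lower).any fun item => PySem.Str.isIn "k-rap" item) = b3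
  generalize ((genres.map PySem.Str.lower).any fun item => PySem.Str.isIn "korean r&b" item) = b4
  generalize ((genres.map PySem.Str.lower).any fun item => PySem.Str.isIn "k-indie" item) = b5
  generalize ((genres.map PySem.Str.lower).any fun item => PySem.Str.isIn "korean indie rock" item) = b6
  generalize ((genres.map PySem.Str.lower).any fun item => PySem.Str.isIn "edm" item) = b7
  generalize ((genres.map PySem.Str.lower).any fun item => PySem.Str.isIn "electronica" item) = b8
  generalize ((genres.map PySem.Str.lower).any fun item => PySem.Str.isIn "trot" item) = b9
  revert b1 b2 b3 b4 b5 b6 b7 b8 b9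
  decide
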